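-- pv_equiv track=rewrite | github.com/yingnn/dict2tree | dict2tree.py | fmt_s
-- ===== SOURCE A (Python) =====
-- def fmt_s(k, l, indent=4):
--     s = ''
--     for i in range(1, k):
--         if i in l:
--             if indent == 2:
--                 s += '| '
--             elif indent == 3:
--                 s += '|  '
--             else:
--                 s += '|   '
--         else:
--             if indent == 2:
--                 s += 2 * ' '
--             elif indent == 3:
--                 s += 3 * ' '
--             else:
--                 s += 4 * ' '
--     if indent == 2:
--         s += '\ %s'
--     elif indent == 3:
--         s += '\_ %s'
--     else:
--         s += '\__ %s'
--
--     return s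
-- ===== SOURCE B (Python) =====
-- def fmt_s(k, l, indent=4):
--     width = indent if indent == 2 or indent == 3 else 4
--     bar = '|' + ' ' * (width - 1)
--     blank = ' ' * width
--     suffix = '\\ %s' if width == 2 else '\\_ %s' if width == 3 else '\\__ %s'
--     segs = [blank] * (k - 1)
--     for i in l:
--         if 1 <= i < k:
--             segs[i - 1] = bar
--     return ''.join(segs) + suffix
-- ===== Notes on version B (the rewrite author's own statement) =====
-- stated objective: faster
-- what changed: Instead of scanning every level 1..k-1 and testing list membership, B precomputes the bar/blank/suffix strings once, allocates k-1 blank segments, places bars by direct index assignment for each element of l, and joins.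
import Mathlib
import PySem

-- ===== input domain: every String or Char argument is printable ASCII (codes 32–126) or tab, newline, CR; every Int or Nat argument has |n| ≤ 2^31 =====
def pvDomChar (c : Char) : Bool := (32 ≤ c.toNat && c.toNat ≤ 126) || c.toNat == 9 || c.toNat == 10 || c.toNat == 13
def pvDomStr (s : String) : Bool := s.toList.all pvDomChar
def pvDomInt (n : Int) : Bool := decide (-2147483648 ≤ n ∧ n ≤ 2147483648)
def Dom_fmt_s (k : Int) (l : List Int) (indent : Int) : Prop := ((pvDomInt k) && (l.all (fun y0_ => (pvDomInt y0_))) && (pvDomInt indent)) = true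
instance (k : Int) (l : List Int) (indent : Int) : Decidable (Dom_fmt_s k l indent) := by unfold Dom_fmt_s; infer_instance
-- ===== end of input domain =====

-- B replaces A's per-level membership scan by one pass of direct segment placement (objective: faster).

-- ===== PORT A =====
def fmt_s (k : Int) (l : List Int) (indent : Int) : String :=
  let s :=
    (PySem.List.pyRange 1 k 1).foldl (fun s i =>
      if l.contains i then
        if indent = 2 then s ++ "| "
        else if indent = 3 then s ++ "|  "
        else s ++ "|   "
      else
        if indent = 2 then s ++ "  "
        else if indent = 3 then s ++ "   "
        else s ++ "    ") ""
  if indent = 2 then s ++ "\\ %s"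
  else if indent = 3 then s ++ "\\_ %s"
  else s ++ "\\__ %s"

-- ===== PORT B =====
def fmt_s_alt (k : Int) (l : List Int) (indent : Int) : String :=
  let width : Int := if indent = 2 ∨ indent = 3 then indent else 4
  let bar : String := "|" ++ String.ofList (List.replicate (width - 1).toNat ' ')
  let blank : String := String.ofList (List.replicate width.toNat ' ')
  let suffix : String := if width = 2 then "\\ %s" else if width = 3 then "\\_ %s" else "\\__ %s"
  let segs := List.replicate (k - 1).toNat blank
  let segs := l.foldl (fun segs i =>
    if 1 ≤ i ∧ i < k then segs.set (i - 1).toNat bar else segs) segs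
  PySem.Str.join "" segs ++ suffix

-- ===== PRECONDITION & SPEC =====
def Spec_fmt_s (k : Int) (l : List Int) (indent : Int) (out : String) : Prop := out = fmt_s_alt k l indent
instance (k : Int) (l : List Int) (indent : Int) (out : String) : Decidable (Spec_fmt_s k l indent out) := by unfold Spec_fmt_s; infer_instance

-- ===== CLAIM (what is proved, stated in full; the proofs are below) =====
def Claim_equal_fmt_s : Prop := ∀ (k : Int) (l : List Int) (indent : Int), Dom_fmt_s k l indent → Spec_fmt_s k l indent (fmt_s k l indent)

-- ===== LEMMAS AND PROOFS =====

-- join "" distributes over cons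
theorem str_join_nil_cons (x : String) (t : List String) :
    PySem.Str.join "" (x :: t) = x ++ PySem.Str.join "" t := by
  simp [PySem.Str.join, PySem.Chars.join, List.intercalate]
  cases t <;> simp

-- fold of string appends = join of the mapped pieces
theorem foldl_str_append {α : Type} (xs : List α) (g : α → String) (init : String) :
    xs.foldl (fun s x => s ++ g x) init = init ++ PySem.Str.join "" (xs.map g) := by
  induction xs generalizing init with
  | nil => simp [PySem.Str.join, PySem.Chars.join, List.intercalate]
  | cons x t ih =>
      simp only [List.foldl_cons, List.map_cons, ih, str_join_nil_cons]
      rw [String.append_assoc]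

-- the B-side fold preserves the segment-list length
theorem set_fold_length (k : Int) (bar : String) (l : List Int) (segs : List String) :
    (l.foldl (fun segs i => if 1 ≤ i ∧ i < k then segs.set (i - 1).toNat bar else segs) segs).length
      = segs.length := by
  induction l generalizing segs with
  | nil => rfl
  | cons i t ih =>
      simp only [List.foldl_cons]
      rw [ih]
      split <;> simp

-- characterisation of the B-side fold: segment j ends up a bar iff level j+1 occurs in l
theorem set_fold_getElem? (k : Int) (bar : String) (l : List Int) (segs : List String)
    (hk : (segs.length : Int) ≤ k - 1) (j : Nat) (hj : j < segs.length) :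
    (l.foldl (fun segs i => if 1 ≤ i ∧ i < k then segs.set (i - 1).toNat bar else segs) segs)[j]?
      = if l.contains ((j : Int) + 1) then some bar else segs[j]? := by
  induction l generalizing segs with
  | nil => simp
  | cons i t ih =>
      simp only [List.foldl_cons]
      have hlen : (if 1 ≤ i ∧ i < k then segs.set (i - 1).toNat bar else segs).length = segs.length := by
        split <;> simp
      rw [ih _ (by rw [hlen]; exact hk) (by rw [hlen]; exact hj)]
      by_cases ht : t.contains ((j : Int) + 1) = true
      · have : (i :: t).contains ((j : Int) + 1) = true := by
          simp only [List.contains_cons, ht, Bool.or_true]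
        rw [if_pos ht, if_pos this]
      · have hjk : (j : Int) < segs.length := by exact_mod_cast hj
        rw [if_neg (by simpa using ht)]
        by_cases hij : i = (j : Int) + 1
        · have hg : 1 ≤ i ∧ i < k := ⟨by omega, by rw [hij]; omega⟩
          have hidx : (i - 1).toNat = j := by omega
          have hmem : (i :: t).contains ((j : Int) + 1) = true := by
            simp [hij]
          rw [if_pos hg, hidx, if_pos hmem]
          simp [hj]
        · have hmem : ¬ ((i :: t).contains ((j : Int) + 1) = true) := by
            simp only [List.contains_cons, Bool.or_eq_true, beq_iff_eq]
            rw [not_or]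
            exact ⟨fun h => hij h.symm, by simpa using ht⟩
          rw [if_neg hmem]
          split
          · rename_i hg
            have hne : (i - 1).toNat ≠ j := by omega
            exact List.getElem?_set_ne hne
          · rfl

-- the B-side segment list, fully characterised
theorem segs_eq (k : Int) (l : List Int) (bar blank : String) :
    l.foldl (fun segs i => if 1 ≤ i ∧ i < k then segs.set (i - 1).toNat bar else segs)
        (List.replicate (k - 1).toNat blank)
      = (List.range (k - 1).toNat).map
          (fun (j : Nat) => if l.contains (1 + (j : Int)) then bar else blank) := by
  apply List.ext_getElem?
  intro j
  by_cases hj : j < (k - 1).toNat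
  · rw [set_fold_getElem? k bar l _ (by simp; omega) j (by simpa using hj)]
    rw [List.getElem?_map, List.getElem?_range hj, List.getElem?_replicate, if_pos hj]
    simp only [Option.map_some]
    rw [Int.add_comm 1 (j:Int)]
    split <;> rfl
  · have h1 : (l.foldl (fun segs i => if 1 ≤ i ∧ i < k then segs.set (i - 1).toNat bar else segs)
        (List.replicate (k - 1).toNat blank)).length = (k - 1).toNat := by
      rw [set_fold_length]; simp
    rw [List.getElem?_eq_none (by omega), List.getElem?_eq_none (by simp; omega)]

-- core equality, for arbitrary bar/blank strings
theorem core_eq (k : Int) (l : List Int) (bar blank : String) :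
    (PySem.List.pyRange 1 k 1).foldl
        (fun s i => if l.contains i then s ++ bar else s ++ blank) ""
      = PySem.Str.join ""
          (l.foldl (fun segs i => if 1 ≤ i ∧ i < k then segs.set (i - 1).toNat bar else segs)
            (List.replicate (k - 1).toNat blank)) := by
  have hfn : (fun (s : String) (i : Int) => if l.contains i then s ++ bar else s ++ blank)
      = (fun s i => s ++ (if l.contains i then bar else blank)) := by
    funext s i; split <;> rfl
  rw [segs_eq, hfn, PySem.List.pyRange_one, foldl_str_append, List.map_map, String.empty_append]
  congr 1

-- ===== VERDICT (by name: the statement is the Claim_ definition above) =====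
theorem fmt_s_spec : Claim_equal_fmt_s := by
  intro k l indent _
  unfold Spec_fmt_s fmt_s fmt_s_alt
  by_cases h2 : indent = 2
  · subst h2
    simp only [show ((2:Int) = 3) = False from by simp, if_true, if_false, true_or]
    rw [show ("|" ++ String.ofList (List.replicate ((2:Int) - 1).toNat ' ')) = "| " from by decide,
        show (String.ofList (List.replicate (2:Int).toNat ' ')) = "  " from by decide]
    rw [core_eq]
  · by_cases h3 : indent = 3
    · subst h3
      simp only [show ((3:Int) = 2) = False from by simp, if_true, if_false, or_true]
      rw [show ("|" ++ String.ofList (List.replicate ((3:Int) - 1).toNat ' ')) = "|  " from by decide,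
          show (String.ofList (List.replicate (3:Int).toNat ' ')) = "   " from by decide]
      rw [core_eq]
    · simp only [show (indent = 2) = False from by simp [h2], show (indent = 3) = False from by simp [h3],
        if_false, false_or,
        show ((4:Int) = 2) = False from by simp, show ((4:Int) = 3) = False from by simp]
      rw [show ("|" ++ String.ofList (List.replicate ((4:Int) - 1).toNat ' ')) = "|   " from by decide,
          show (String.ofList (List.replicate (4:Int).toNat ' ')) = "    " from by decide]
      rw [core_eq]
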